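-- pv_equiv track=rewrite | github.com/yeinoh36/cote | 프로그래머스/2/42885. 구명보트/구명보트.py | solution
-- ===== SOURCE A (Python) =====
-- from collections import deque
--
-- def solution(people, limit):
--     answer = 0
--
--     que = deque(sorted(people))  # 몸무게를 정렬해서 덱으로 변환
--
--     while len(que) > 1:
--         max_w = que.pop()  # 가장 무거운 사람을 덱의 끝에서 꺼냄
--         threshold = limit - max_w  # 남은 제한 무게
--
--         # 덱에 사람이 남아 있고, 가장 가벼운 사람이 현재 threshold 이하일 경우
--         if que and que[0] <= threshold:
--             que.popleft()  # 가장 가벼운 사람을 태워 보냄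
--
--         answer += 1  # 한 번의 탑승 완료
--
--     if que:  # 마지막으로 한 명이 남아 있으면 한 번 더 필요
--         answer += 1
--
--     return answer
-- ===== SOURCE B (Python) =====
-- def solution(people, limit):
--     people = sorted(people)
--     pairs = 0
--     left, right = 0, len(people) - 1
--     while left < right:
--         if people[left] + people[right] <= limit:
--             pairs += 1
--             left += 1
--         right -= 1
--     return len(people) - pairs
-- ===== Notes on version B (the rewrite author's own statement) =====
-- stated objective: simpler
-- what changed: Replaces the deque with destructive pops and a per-boat answer counter plus final leftover check by two index pointers over the sorted list that only count matched pairs, returning len(people) - pairs in closed form.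
import Mathlib
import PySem

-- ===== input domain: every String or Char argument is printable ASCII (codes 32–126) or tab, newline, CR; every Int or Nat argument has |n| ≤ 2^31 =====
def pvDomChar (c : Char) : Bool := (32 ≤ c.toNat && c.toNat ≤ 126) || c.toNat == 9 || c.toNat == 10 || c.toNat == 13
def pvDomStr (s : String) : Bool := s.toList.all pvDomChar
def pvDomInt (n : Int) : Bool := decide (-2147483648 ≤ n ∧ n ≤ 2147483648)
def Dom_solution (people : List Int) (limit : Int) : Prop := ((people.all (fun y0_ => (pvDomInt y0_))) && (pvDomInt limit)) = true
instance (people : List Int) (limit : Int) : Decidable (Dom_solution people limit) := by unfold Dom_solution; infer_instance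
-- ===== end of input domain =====

-- B replaces A's deque pops and per-boat answer counter by two index pointers that
-- count matched pairs over the sorted list, returning len(people) - pairs (objective: simpler).

-- ===== PORT A =====
-- while len(que) > 1: max_w = que.pop(); if que and que[0] <= limit - max_w: que.popleft(); answer += 1
def solutionLoopA (limit : Int) (q : List Int) (answer : Int) : Int :=
  if 1 < q.length then
    let max_w := q.getLastD 0
    let threshold := limit - max_w
    let q' := q.dropLast
    if q' ≠ [] ∧ q'.headD 0 ≤ threshold then
      solutionLoopA limit q'.tail (answer + 1)
    else
      solutionLoopA limit q' (answer + 1)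
  else if q ≠ [] then answer + 1 else answer
termination_by q.length
decreasing_by
  · simp only [List.length_tail, List.length_dropLast]; omega
  · simp only [List.length_dropLast]; omega

def solution (people : List Int) (limit : Int) : Int :=
  solutionLoopA limit (PySem.List.sorted people (fun x => x) false) 0

-- ===== PORT B =====
-- while left < right: if people[left] + people[right] <= limit: pairs += 1; left += 1
--                     right -= 1
-- (indexing is in range whenever it happens, so getD 0 is exact)
def solutionLoopB (s : List Int) (limit : Int) (left right : Nat) (pairs : Int) : Int :=
  if left < right then
    if s.getD left 0 + s.getD right 0 ≤ limit then
      solutionLoopB s limit (left + 1) (right - 1) (pairs + 1)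
    else
      solutionLoopB s limit left (right - 1) pairs
  else pairs
termination_by right - left

def solution_alt (people : List Int) (limit : Int) : Int :=
  let s := PySem.List.sorted people (fun x => x) false
  (s.length : Int) - solutionLoopB s limit 0 (s.length - 1) 0

-- ===== PRECONDITION & SPEC =====
def Spec_solution (people : List Int) (limit : Int) (out : Int) : Prop := out = solution_alt people limit
instance (people : List Int) (limit : Int) (out : Int) : Decidable (Spec_solution people limit out) := by unfold Spec_solution; infer_instance

-- ===== CLAIM (what is proved, stated in full; the proofs are below) =====
def Claim_equal_solution : Prop := ∀ (people : List Int) (limit : Int), Dom_solution people limit → Spec_solution people limit (solution people limit)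

-- ===== LEMMAS AND PROOFS =====

-- number of matched pairs the greedy forms on a (sorted) list
def pairsL (limit : Int) : List Int → Int
  | [] => 0
  | [_] => 0
  | a :: b :: t =>
    if a ≤ limit - (b :: t).getLastD 0 then 1 + pairsL limit ((b :: t).dropLast)
    else pairsL limit (a :: (b :: t).dropLast)
termination_by q => q.length
decreasing_by
  · simp only [List.length_dropLast, List.length_cons]; omega
  · simp only [List.length_cons, List.length_dropLast]; omega

theorem pairsL_small (limit : Int) (q : List Int) (h : q.length ≤ 1) : pairsL limit q = 0 := by
  match q with
  | [] => simp [pairsL]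
  | [_] => simp [pairsL]
  | _ :: _ :: _ => simp at h

theorem pairsL_two (limit : Int) (q : List Int) (h : 1 < q.length) :
    pairsL limit q =
      if q.headD 0 ≤ limit - q.getLastD 0 then 1 + pairsL limit q.dropLast.tail
      else pairsL limit q.dropLast := by
  match q with
  | a :: b :: t => simp [pairsL]

theorem loopA_eq (limit : Int) (q : List Int) (ans : Int) :
    solutionLoopA limit q ans = ans + (q.length : Int) - pairsL limit q := by
  induction q, ans using solutionLoopA.induct (limit := limit) with
  | case1 q ans h max_w threshold q' hc ih =>
    obtain ⟨a, b, t, rfl⟩ : ∃ a b t, q = a :: b :: t := by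
      match q, h with | a :: b :: t, _ => exact ⟨a, b, t, rfl⟩
    rw [solutionLoopA]
    simp only [max_w, threshold, q', List.dropLast_cons₂, List.tail_cons,
      List.getLastD_cons, ne_eq, List.headD_cons, reduceCtorEq, not_false_eq_true,
      true_and, List.length_cons, List.length_dropLast] at hc ih ⊢
    rw [if_pos (by simp), if_pos (by simpa using hc), ih]
    have hcc : a ≤ limit - (b :: t).getLastD 0 := by
      simpa [List.getLast?_cons, List.getLastD_eq_getLast?] using hc
    simp only [pairsL, if_pos hcc]
    push_cast; ring
  | case2 q ans h max_w threshold q' hc ih =>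
    obtain ⟨a, b, t, rfl⟩ : ∃ a b t, q = a :: b :: t := by
      match q, h with | a :: b :: t, _ => exact ⟨a, b, t, rfl⟩
    rw [solutionLoopA]
    simp only [max_w, threshold, q', List.dropLast_cons₂, List.tail_cons,
      List.getLastD_cons, ne_eq, List.headD_cons, reduceCtorEq, not_false_eq_true,
      true_and, List.length_cons, List.length_dropLast, not_le] at hc ih ⊢
    rw [if_pos (by simp), if_neg (by simpa using hc), ih]
    have hcc : ¬ a ≤ limit - (b :: t).getLastD 0 := by
      simpa [List.getLast?_cons, List.getLastD_eq_getLast?] using hc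
    simp only [pairsL, if_neg hcc]
    push_cast; ring
  | case3 q ans h hne =>
    rw [solutionLoopA]
    rw [if_neg h, if_pos hne]
    match q, hne with
    | [a], _ => simp [pairsL]
    | _ :: _ :: _, _ => simp at h
  | case4 q ans h hne =>
    rw [solutionLoopA]
    rw [if_neg h, if_neg hne]
    match q with
    | [] => simp [pairsL]
    | _ :: _ => simp at hne

theorem take_tail' {α : Type} (l : List α) (k : Nat) : (l.take k).tail = l.tail.take (k - 1) := by
  cases l <;> cases k <;> simp

theorem take_dropLast' {α : Type} (l : List α) (k : Nat) (hk : k ≤ l.length) :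
    (l.take k).dropLast = l.take (k - 1) := by
  rw [List.dropLast_eq_take, List.length_take, List.take_take]
  congr 1
  omega

theorem seg_getD (s : List Int) (left k i : Nat) (hi : i < k) (_h : left + i < s.length) :
    ((s.drop left).take k).getD i 0 = s.getD (left + i) 0 := by
  rw [List.getD_eq_getElem?_getD, List.getD_eq_getElem?_getD,
    List.getElem?_take_of_lt hi, List.getElem?_drop]

theorem seg_headD (s : List Int) (left k : Nat) (hk : 0 < k) (h : left < s.length) :
    ((s.drop left).take k).headD 0 = s.getD left 0 := by
  have hne : (s.drop left).take k ≠ [] := by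
    simp [List.take_eq_nil_iff, List.drop_eq_nil_iff]; omega
  rw [List.headD_eq_head?, List.head?_eq_getElem?, ← List.getD_eq_getElem?_getD]
  have := seg_getD s left k 0 hk (by omega)
  simpa using this

theorem seg_getLastD (s : List Int) (left k : Nat) (hk : 0 < k) (hle : left + k ≤ s.length) :
    ((s.drop left).take k).getLastD 0 = s.getD (left + (k - 1)) 0 := by
  have hlen : ((s.drop left).take k).length = k := by
    simp [List.length_take, List.length_drop]; omega
  rw [List.getLastD_eq_getLast?, List.getLast?_eq_getElem?, hlen,
    ← List.getD_eq_getElem?_getD]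
  exact seg_getD s left k (k - 1) (by omega) (by omega)

theorem loopB_eq (s : List Int) (limit : Int) (k : Nat) :
    ∀ (left right : Nat) (pairs : Int), right - left ≤ k → right < s.length →
      solutionLoopB s limit left right pairs
        = pairs + pairsL limit ((s.drop left).take (right + 1 - left)) := by
  induction k with
  | zero =>
    intro left right pairs hk h
    rw [solutionLoopB, if_neg (by omega)]
    rw [pairsL_small limit _ (by simp [List.length_take]; omega)]
    ring
  | succ k ih =>
    intro left right pairs hk h
    by_cases hlt : left < right
    · have hlen : ((s.drop left).take (right + 1 - left)).length = right + 1 - left := by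
        simp [List.length_take, List.length_drop]; omega
      have h2 : 1 < ((s.drop left).take (right + 1 - left)).length := by omega
      rw [solutionLoopB, if_pos hlt, pairsL_two limit _ h2]
      rw [seg_headD s left _ (by omega) (by omega),
        seg_getLastD s left _ (by omega) (by omega)]
      have hr : left + (right + 1 - left - 1) = right := by omega
      rw [hr]
      have hdl : ((s.drop left).take (right + 1 - left)).dropLast
          = (s.drop left).take (right - left) := by
        rw [take_dropLast' _ _ (by simp [List.length_drop]; omega)]
        congr 1
        omega
      by_cases hc : s.getD left 0 + s.getD right 0 ≤ limit
      · rw [if_pos hc, if_pos (by omega)]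
        rw [ih (left + 1) (right - 1) (pairs + 1) (by omega) (by omega)]
        rw [hdl, take_tail', List.tail_drop]
        have : right - left - 1 = right - 1 + 1 - (left + 1) := by omega
        rw [this]
        ring
      · rw [if_neg hc, if_neg (by omega)]
        rw [ih left (right - 1) pairs (by omega) (by omega)]
        rw [hdl]
        have : right - left = right - 1 + 1 - left := by omega
        rw [this]
    · rw [solutionLoopB, if_neg hlt]
      rw [pairsL_small limit _ (by simp [List.length_take]; omega)]
      ring

theorem main_eq (limit : Int) (s : List Int) :
    solutionLoopA limit s 0 = (s.length : Int) - solutionLoopB s limit 0 (s.length - 1) 0 := by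
  rw [loopA_eq]
  cases s with
  | nil => simp [solutionLoopB, pairsL]
  | cons a t =>
    rw [loopB_eq (a :: t) limit ((a :: t).length) 0 ((a :: t).length - 1) 0 (by omega) (by simp)]
    have h2 : ((a :: t).drop 0).take ((a :: t).length - 1 + 1 - 0) = a :: t := by simp
    rw [h2]
    ring

-- ===== VERDICT (by name: the statement is the Claim_ definition above) =====
theorem solution_spec : Claim_equal_solution := by
  intro people limit _
  unfold Spec_solution solution solution_alt
  exact main_eq limit (PySem.List.sorted people (fun x => x) false)
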